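-- pv_equiv track=rewrite | github.com/MrBrantCode/unitest_baseline | mut_generate/mist_train_cf/cf_66648/solution.py | five_div_seq
-- ===== SOURCE A (Python) =====
-- def five_div_seq(n: int) -> int:
--     # Initialize our counter to 0
--     five_count = 0
--
--     # Loop from n down to 1
--     for i in range(n, 0, -1):
--         # Check if i is divisible by either 9 or 14
--         if i % 9 == 0 or i % 14 == 0:
--             # Convert i to a string
--             str_i = str(i)
--             # Check if the integer is at least 3 digits long
--             if len(str_i) >= 3:
--                 # Count the number of times 5 appears in the string
--                 five_count += str_i.count('5')
--
--     return five_count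
-- ===== SOURCE B (Python) =====
-- def five_div_seq(n: int) -> int:
--     # Inclusion-exclusion over multiples: walk only the multiples of 9 and of 14,
--     # subtract the multiples of lcm(9,14)=126, which the first two walks count twice.
--     def digit_fives(i: int) -> int:
--         s = str(i)
--         return s.count('5') if len(s) >= 3 else 0
--
--     total = 0
--     for i in range(9, n + 1, 9):
--         total += digit_fives(i)
--     for i in range(14, n + 1, 14):
--         total += digit_fives(i)
--     for i in range(126, n + 1, 126):
--         total -= digit_fives(i)
--     return total
-- ===== Notes on version B (the rewrite author's own statement) =====
-- stated objective: faster
-- what changed: Instead of scanning every integer from n down to 1 and testing divisibility, B walks only the multiples of 9 and of 14 and subtracts the multiples of lcm(9,14)=126 by inclusion-exclusion.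
import Mathlib
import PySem

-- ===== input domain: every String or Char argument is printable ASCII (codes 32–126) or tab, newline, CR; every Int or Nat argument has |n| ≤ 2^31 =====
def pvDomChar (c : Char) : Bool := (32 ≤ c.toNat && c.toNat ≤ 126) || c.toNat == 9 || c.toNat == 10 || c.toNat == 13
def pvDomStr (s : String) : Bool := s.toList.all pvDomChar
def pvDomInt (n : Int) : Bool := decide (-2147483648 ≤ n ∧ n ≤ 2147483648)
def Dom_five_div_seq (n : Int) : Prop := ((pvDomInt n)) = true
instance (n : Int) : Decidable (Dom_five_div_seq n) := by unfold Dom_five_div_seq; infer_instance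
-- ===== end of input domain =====

-- B replaces A's scan of every integer (with a divisibility test) by walking only the
-- multiples of 9 and 14 and subtracting the multiples of 126 (inclusion-exclusion).

-- ===== PORT A =====
def five_div_seq (n : Int) : Int :=
  (PySem.List.pyRange n 0 (-1)).foldl (fun five_count i =>
    if PySem.Int.mod i 9 == 0 || PySem.Int.mod i 14 == 0 then
      let str_i := PySem.Int.toChars i
      if 3 ≤ str_i.length then
        five_count + (PySem.Chars.count str_i ['5'] : Int)
      else five_count
    else five_count) 0

-- ===== PORT B =====
def pvDigitFives (i : Int) : Int :=
  let s := PySem.Int.toChars i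
  if 3 ≤ s.length then (PySem.Chars.count s ['5'] : Int) else 0

def five_div_seq_alt (n : Int) : Int :=
  -- total after the three loops of Source B, in order: multiples of 9, of 14, minus those of 126
  (PySem.List.pyRange 126 (n + 1) 126).foldl (fun total i => total - pvDigitFives i)
    ((PySem.List.pyRange 14 (n + 1) 14).foldl (fun total i => total + pvDigitFives i)
      ((PySem.List.pyRange 9 (n + 1) 9).foldl (fun total i => total + pvDigitFives i) 0))

-- ===== PRECONDITION & SPEC =====
def Spec_five_div_seq (n : Int) (out : Int) : Prop := out = five_div_seq_alt n
instance (n : Int) (out : Int) : Decidable (Spec_five_div_seq n out) := by unfold Spec_five_div_seq; infer_instance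

-- ===== CLAIM (what is proved, stated in full; the proofs are below) =====
def Claim_equal_five_div_seq : Prop := ∀ (n : Int), Dom_five_div_seq n → Spec_five_div_seq n (five_div_seq n)

-- ===== LEMMAS AND PROOFS =====

-- an empty positive-step range
theorem pvRange_pos_nil (a b : Int) (ha : 0 < a) (hb : b ≤ a) :
    PySem.List.pyRange a b a = [] := by
  rw [PySem.List.pyRange_of_pos _ _ ha, if_neg (by omega)]
  simp

-- a positive-step range is strictly increasing
theorem pvRange_pos_pairwise (a b : Int) (ha : 0 < a) :
    (PySem.List.pyRange a b a).Pairwise (· < ·) := by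
  rw [PySem.List.pyRange_of_pos _ _ ha]
  refine List.Pairwise.map _ ?_ (List.pairwise_lt_range)
  intro x y hxy
  have hc : (x : Int) < (y : Int) := by exact_mod_cast hxy
  have := mul_lt_mul_of_pos_left hc ha
  omega

-- growing the stop of a step-a range by one appends m exactly when a ∣ m
theorem pvRange_pos_succ (a m : Int) (ha : 0 < a) (hm : 0 ≤ m) :
    PySem.List.pyRange a (m + 1) a
      = PySem.List.pyRange a m a ++ (if a ∣ m ∧ 0 < m then [m] else []) := by
  have hpl : (PySem.List.pyRange a (m + 1) a).Pairwise (· < ·) := pvRange_pos_pairwise a (m + 1) ha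
  have hpr : (PySem.List.pyRange a m a ++ (if a ∣ m ∧ 0 < m then [m] else [])).Pairwise (· < ·) := by
    rw [List.pairwise_append]
    refine ⟨pvRange_pos_pairwise a m ha, ?_, ?_⟩
    · split_ifs with h
      · simp
      · simp
    · intro x hx y hy
      rw [PySem.List.mem_pyRange_iff_of_pos ha] at hx
      split_ifs at hy with h
      · simp at hy; omega
      · simp at hy
  have nodl : (PySem.List.pyRange a (m + 1) a).Nodup := hpl.imp (fun h => ne_of_lt h)
  have nodr : (PySem.List.pyRange a m a ++ (if a ∣ m ∧ 0 < m then [m] else [])).Nodup :=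
    hpr.imp (fun h => ne_of_lt h)
  refine List.Perm.eq_of_pairwise (fun x y _ _ h1 h2 => absurd h2 (asymm h1)) hpl hpr ?_
  rw [List.perm_ext_iff_of_nodup nodl nodr]
  intro x
  rw [List.mem_append, PySem.List.mem_pyRange_iff_of_pos ha, PySem.List.mem_pyRange_iff_of_pos ha]
  have hdx : a ∣ x - a ↔ a ∣ x := by
    constructor <;> intro h
    · have := dvd_add h (dvd_refl a); simpa using this
    · exact dvd_sub h (dvd_refl a)
  rw [hdx]
  constructor
  · rintro ⟨h1, h2, h3⟩
    by_cases hx : x = m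
    · subst hx
      right
      have : a ≤ x := h1
      simp only [if_pos (⟨h3, by omega⟩ : a ∣ x ∧ 0 < x)]
      simp
    · exact Or.inl ⟨h1, by omega, h3⟩
  · rintro (⟨h1, h2, h3⟩ | hx)
    · exact ⟨h1, by omega, h3⟩
    · split_ifs at hx with h
      · simp at hx
        subst hx
        have : a ≤ x := Int.le_of_dvd h.2 h.1
        exact ⟨this, by omega, h.1⟩
      · simp at hx

-- the sum over the multiples of a up to m equals the filtered sum over all of 1..m
theorem pvSumMult (a : Int) (ha : 0 < a) (g : Int → Int) (m : Nat) :
    ((PySem.List.pyRange a ((m : Int) + 1) a).map g).sum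
      = ((PySem.List.pyRange 1 ((m : Int) + 1) 1).map (fun i => if a ∣ i then g i else 0)).sum := by
  induction m with
  | zero =>
      have h0 : ((0 : Nat) : Int) + 1 = 1 := by norm_num
      rw [h0, pvRange_pos_nil a 1 ha (by omega), PySem.List.pyRange_one_eq_nil (by omega)]
      simp
  | succ k ih =>
      have hk : ((k : Int) + 1) + 1 = ((k + 1 : Nat) : Int) + 1 := by push_cast; ring
      rw [← hk,
        pvRange_pos_succ a ((k : Int) + 1) ha (by omega),
        PySem.List.pyRange_one_succ_right (by omega)]
      rw [List.map_append, List.sum_append, List.map_append, List.sum_append, ih]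
      congr 1
      have hpos : (0 : Int) < (k : Int) + 1 := by omega
      by_cases hd : a ∣ (k : Int) + 1
      · rw [if_pos ⟨hd, hpos⟩]
        simp [hd]
      · rw [if_neg (by tauto)]
        simp [hd]

-- A's loop body written as an accumulator-plus-contribution
theorem pvBodyA :
    (fun (five_count : Int) (i : Int) =>
      if PySem.Int.mod i 9 == 0 || PySem.Int.mod i 14 == 0 then
        let str_i := PySem.Int.toChars i
        if 3 ≤ str_i.length then
          five_count + (PySem.Chars.count str_i ['5'] : Int)
        else five_count
      else five_count)
    = (fun (five_count : Int) (i : Int) =>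
        five_count + (if PySem.Int.mod i 9 == 0 || PySem.Int.mod i 14 == 0 then pvDigitFives i else 0)) := by
  funext acc i
  simp only [pvDigitFives]
  split_ifs <;> simp

-- 126 = lcm 9 14
theorem pvDvd126 (i : Int) : 126 ∣ i ↔ 9 ∣ i ∧ 14 ∣ i := by omega

-- the pointwise inclusion-exclusion identity
theorem pvPointwise (i : Int) :
    (if PySem.Int.mod i 9 == 0 || PySem.Int.mod i 14 == 0 then pvDigitFives i else 0)
      = (if (9 : Int) ∣ i then pvDigitFives i else 0)
        + (if (14 : Int) ∣ i then pvDigitFives i else 0)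
        + (if (126 : Int) ∣ i then -pvDigitFives i else 0) := by
  simp only [beq_iff_eq, Bool.or_eq_true, PySem.Int.mod_eq_zero_iff_dvd, pvDvd126]
  by_cases ha : (9 : Int) ∣ i <;> by_cases hb : (14 : Int) ∣ i <;>
    simp [ha, hb]

-- ===== VERDICT (by name: the statement is the Claim_ definition above) =====
theorem five_div_seq_spec : Claim_equal_five_div_seq := by
  intro n _
  unfold Spec_five_div_seq
  show five_div_seq n = five_div_seq_alt n
  unfold five_div_seq five_div_seq_alt
  rw [pvBodyA]
  rw [PySem.List.foldl_add, PySem.List.foldl_add, PySem.List.foldl_add]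
  have hsub : (fun (total : Int) (i : Int) => total - pvDigitFives i)
      = (fun (total : Int) (i : Int) => total + (fun j => -pvDigitFives j) i) := by
    funext t i; ring
  rw [hsub, PySem.List.foldl_add]
  by_cases hn : 0 ≤ n
  · obtain ⟨m, hm⟩ : ∃ m : Nat, n = (m : Int) := ⟨n.toNat, (Int.toNat_of_nonneg hn).symm⟩
    subst hm
    rw [PySem.List.pyRange_neg_one_eq_reverse, List.map_reverse, List.sum_reverse]
    have h0 : (0 : Int) + 1 = 1 := by norm_num
    rw [h0]
    rw [pvSumMult 9 (by norm_num) pvDigitFives m,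
        pvSumMult 14 (by norm_num) pvDigitFives m,
        pvSumMult 126 (by norm_num) (fun j => -pvDigitFives j) m]
    have hpt : ((PySem.List.pyRange 1 ((m : Int) + 1) 1).map
        (fun i => if PySem.Int.mod i 9 == 0 || PySem.Int.mod i 14 == 0 then pvDigitFives i else 0))
      = (PySem.List.pyRange 1 ((m : Int) + 1) 1).map
        (fun i => (if (9 : Int) ∣ i then pvDigitFives i else 0)
          + ((if (14 : Int) ∣ i then pvDigitFives i else 0)
            + (if (126 : Int) ∣ i then -pvDigitFives i else 0))) := by
      apply List.map_congr_left
      intro i _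
      rw [pvPointwise i]
      ring
    rw [hpt]
    rw [PySem.List.sum_map_add_int, PySem.List.sum_map_add_int]
    ring
  · rw [PySem.List.pyRange_neg_one_eq_nil (by omega),
        pvRange_pos_nil 9 (n + 1) (by norm_num) (by omega),
        pvRange_pos_nil 14 (n + 1) (by norm_num) (by omega),
        pvRange_pos_nil 126 (n + 1) (by norm_num) (by omega)]
    simp
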